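-- pv_equiv track=rewrite | github.com/eligotts/World-Cup-Statistics | Gottlieb.DataProject copy.py | CHECKWINLOSS
-- ===== SOURCE A (Python) =====
-- def CHECKWINLOSS(series):
--     dd=0
--     Works=0
--     DoesntWork=0
--     Tie=0
--     length2=len(series)
--     while dd<length2:
--         if series[dd]==1:
--             Works=Works+1
--             dd=dd+1
--         elif series[dd]==0:
--             DoesntWork=DoesntWork+1
--             dd=dd+1
--         elif series[dd]==2:
--             Tie=Tie+1
--             dd=dd+1
--         else:
--             dd=dd+1
--     return (Works, DoesntWork, Tie)
-- ===== SOURCE B (Python) =====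
-- def CHECKWINLOSS(series):
--     return (series.count(1), series.count(0), series.count(2))
-- ===== Notes on version B (the rewrite author's own statement) =====
-- stated objective: idiomatic
-- what changed: Replaces the indexed while-loop with three accumulators by three independent list.count scans returning the tuple directly.
import Mathlib
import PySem

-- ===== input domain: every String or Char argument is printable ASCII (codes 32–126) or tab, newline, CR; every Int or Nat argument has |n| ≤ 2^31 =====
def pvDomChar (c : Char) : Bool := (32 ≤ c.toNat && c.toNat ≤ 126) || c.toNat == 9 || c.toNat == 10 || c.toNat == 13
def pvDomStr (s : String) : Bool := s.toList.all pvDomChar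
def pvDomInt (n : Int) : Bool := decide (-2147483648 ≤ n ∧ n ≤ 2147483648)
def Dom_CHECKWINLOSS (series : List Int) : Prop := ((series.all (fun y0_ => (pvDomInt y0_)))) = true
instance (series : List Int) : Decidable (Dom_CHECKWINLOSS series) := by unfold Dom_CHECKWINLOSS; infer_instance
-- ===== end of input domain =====

-- B replaces A's indexed while-loop with three counters by three list.count scans (idiomatic; same O(n) cost).


-- ===== PORT A =====
-- The while-loop visits series[dd] for dd = 0,1,…,len-1, incrementing dd in every
-- branch, so it is transcribed as a left fold over the list carrying (Works, DoesntWork, Tie).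
def CHECKWINLOSS_step (acc : Int × Int × Int) (x : Int) : Int × Int × Int :=
  let (Works, DoesntWork, Tie) := acc
  if x == 1 then (Works + 1, DoesntWork, Tie)
  else if x == 0 then (Works, DoesntWork + 1, Tie)
  else if x == 2 then (Works, DoesntWork, Tie + 1)
  else (Works, DoesntWork, Tie)

def CHECKWINLOSS (series : List Int) : Int × Int × Int :=
  series.foldl CHECKWINLOSS_step (0, 0, 0)

-- ===== PORT B =====
def CHECKWINLOSS_alt (series : List Int) : Int × Int × Int :=
  (PySem.List.count series 1, PySem.List.count series 0, PySem.List.count series 2)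

-- ===== PRECONDITION & SPEC =====
def Spec_CHECKWINLOSS (series : List Int) (out : Int × Int × Int) : Prop := out = CHECKWINLOSS_alt series
instance (series : List Int) (out : Int × Int × Int) : Decidable (Spec_CHECKWINLOSS series out) := by unfold Spec_CHECKWINLOSS; infer_instance

-- ===== CLAIM (what is proved, stated in full; the proofs are below) =====
def Claim_equal_CHECKWINLOSS : Prop := ∀ (series : List Int), Dom_CHECKWINLOSS series → Spec_CHECKWINLOSS series (CHECKWINLOSS series)

-- ===== LEMMAS AND PROOFS =====
theorem CHECKWINLOSS_loop (series : List Int) (W D T : Int) :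
    series.foldl CHECKWINLOSS_step (W, D, T)
      = (W + series.count 1, D + series.count 0, T + series.count 2) := by
  induction series generalizing W D T with
  | nil => simp
  | cons h t ih =>
      rw [List.foldl_cons]
      by_cases h1 : h = 1
      · subst h1
        rw [show CHECKWINLOSS_step (W, D, T) 1 = (W + 1, D, T) from rfl, ih]
        simp only [List.count_cons, Prod.mk.injEq]
        refine ⟨by simp; ring, by simp, by simp⟩
      · by_cases h0 : h = 0
        · subst h0
          rw [show CHECKWINLOSS_step (W, D, T) 0 = (W, D + 1, T) from rfl, ih]
          simp only [List.count_cons, Prod.mk.injEq]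
          refine ⟨by simp, by simp; ring, by simp⟩
        · by_cases h2 : h = 2
          · subst h2
            rw [show CHECKWINLOSS_step (W, D, T) 2 = (W, D, T + 1) from rfl, ih]
            simp only [List.count_cons, Prod.mk.injEq]
            refine ⟨by simp, by simp, by simp; ring⟩
          · have step_eq : CHECKWINLOSS_step (W, D, T) h = (W, D, T) := by
              simp [CHECKWINLOSS_step, h1, h0, h2]
            rw [step_eq, ih]
            simp only [List.count_cons, Prod.mk.injEq]
            exact ⟨by simp [h1], by simp [h0], by simp [h2]⟩

-- ===== VERDICT (by name: the statement is the Claim_ definition above) =====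
theorem CHECKWINLOSS_spec : Claim_equal_CHECKWINLOSS := by
  intro series _
  unfold Spec_CHECKWINLOSS CHECKWINLOSS CHECKWINLOSS_alt
  rw [CHECKWINLOSS_loop]
  simp [PySem.List.count_eq]
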